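-- pv_equiv track=rewrite | github.com/REM-Infotech/CrawJUD-Reestruturado | api/middleware.py | _parse_forwarded
-- ===== SOURCE A (Python) =====
-- def _parse_forwarded(
--
--     value: str,
-- ) -> tuple[str | None, str | None, str | None]:
--     """Extrai os valores de client, host e scheme do cabeçalho Forwarded.
--
--     Args:
--         value (str): Valor do cabeçalho Forwarded.
--
--     Returns:
--         tuple[str | None, str | None, str | None]: Tupla com client, host e scheme
--
--     """
--     client: str | None = None
--     host: str | None = None
--     scheme: str | None = None
--     for part in value.split(";"):
--         if part.startswith("for="):
--             client = part[4:].strip()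
--         elif part.startswith("host="):
--             host = part[5:].strip()
--         elif part.startswith("proto="):
--             scheme = part[6:].strip()
--     return client, host, scheme
-- ===== SOURCE B (Python) =====
-- def _parse_forwarded(
--     value: str,
-- ) -> tuple[str | None, str | None, str | None]:
--     """Extrai client, host e scheme do cabecalho Forwarded via tabela chave->valor."""
--     fields: dict[str, str] = {}
--     for part in value.split(";"):
--         i = part.find("=")
--         if i != -1:
--             fields[part[:i]] = part[i + 1:].strip()
--     return fields.get("for"), fields.get("host"), fields.get("proto")
-- ===== Notes on version B (the rewrite author's own statement) =====
-- stated objective: alternative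
-- what changed: Replaces the three per-part prefix-test-and-slice branches by one generic pass that splits every part at its first equals sign into a key-to-value dict and then reads the three fields out by lookup.
import Mathlib
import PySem

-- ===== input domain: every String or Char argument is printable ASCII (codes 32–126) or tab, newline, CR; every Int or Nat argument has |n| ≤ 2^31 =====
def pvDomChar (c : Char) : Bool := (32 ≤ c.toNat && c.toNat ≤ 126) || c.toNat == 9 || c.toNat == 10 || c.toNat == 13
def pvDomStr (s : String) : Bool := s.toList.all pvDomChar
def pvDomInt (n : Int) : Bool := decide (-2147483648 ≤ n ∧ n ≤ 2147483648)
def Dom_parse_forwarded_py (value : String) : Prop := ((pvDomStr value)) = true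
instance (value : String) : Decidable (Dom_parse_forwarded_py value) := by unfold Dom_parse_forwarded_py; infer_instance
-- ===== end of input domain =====

-- B replaces A's three per-part prefix branches by a key-to-value table built in one generic pass
-- plus three lookups; same cost, different decomposition (objective: alternative).

-- ===== PORT A =====
-- the loop body of A: three startswith branches updating (client, host, scheme)
def pvStepA (st : Option String × Option String × Option String) (part : List Char) :
    Option String × Option String × Option String :=
  if PySem.Chars.startswith part ['f','o','r','='] then
    (some (String.ofList (PySem.Chars.strip (PySem.Chars.slice part (some 4) none))), st.2.1, st.2.2)
  else if PySem.Chars.startswith part ['h','o','s','t','='] then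
    (st.1, some (String.ofList (PySem.Chars.strip (PySem.Chars.slice part (some 5) none))), st.2.2)
  else if PySem.Chars.startswith part ['p','r','o','t','o','='] then
    (st.1, st.2.1, some (String.ofList (PySem.Chars.strip (PySem.Chars.slice part (some 6) none))))
  else st

def parse_forwarded_py (value : String) : Option String × Option String × Option String :=
  (PySem.Chars.splitOn value.toList [';']).foldl pvStepA (none, none, none)

-- ===== PORT B =====
-- the loop body of B: split the part at its first '=' and record key → stripped value
def pvStepB (d : PySem.Dict (List Char) String) (part : List Char) : PySem.Dict (List Char) String :=
  let i := PySem.Chars.find part ['=']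
  if i ≠ -1 then
    d.insert (PySem.Chars.slice part none (some i))
      (String.ofList (PySem.Chars.strip (PySem.Chars.slice part (some (i + 1)) none)))
  else d

def parse_forwarded_py_alt (value : String) : Option String × Option String × Option String :=
  let d := (PySem.Chars.splitOn value.toList [';']).foldl pvStepB PySem.Dict.empty
  (d.get? ['f','o','r'], d.get? ['h','o','s','t'], d.get? ['p','r','o','t','o'])

-- ===== PRECONDITION & SPEC =====
def Spec_parse_forwarded_py (value : String) (out : Option String × Option String × Option String) : Prop := out = parse_forwarded_py_alt value
instance (value : String) (out : Option String × Option String × Option String) : Decidable (Spec_parse_forwarded_py value out) := by unfold Spec_parse_forwarded_py; infer_instance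

-- ===== CLAIM (what is proved, stated in full; the proofs are below) =====
def Claim_equal_parse_forwarded_py : Prop := ∀ (value : String), Dom_parse_forwarded_py value → Spec_parse_forwarded_py value (parse_forwarded_py value)

-- ===== LEMMAS AND PROOFS =====

-- segments before the first '=' are unique
lemma pv_eqsplit (p : List Char) : ∀ (k : List Char) (w v : List Char), '=' ∉ p → '=' ∉ k →
    p ++ '=' :: w = k ++ '=' :: v → p = k := by
  induction p with
  | nil =>
    intro k w v _ hk h
    cases k with
    | nil => rfl
    | cons c k' =>
      simp only [List.nil_append, List.cons_append, List.cons.injEq] at h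
      exact absurd (h.1 ▸ List.mem_cons_self) hk
  | cons c p' ih =>
    intro k w v hp hk h
    cases k with
    | nil =>
      simp only [List.cons_append, List.nil_append, List.cons.injEq] at h
      exact absurd (h.1 ▸ List.mem_cons_self) hp
    | cons c' k' =>
      simp only [List.cons_append, List.cons.injEq] at h
      have := ih k' w v (fun hm => hp (List.mem_cons_of_mem _ hm))
        (fun hm => hk (List.mem_cons_of_mem _ hm)) h.2
      rw [h.1, this]

-- A's branch test characterized on a part split at its first '='
lemma pv_startswith_iff (k v p : List Char) (hk : '=' ∉ k) (hp : '=' ∉ p) :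
    PySem.Chars.startswith (k ++ '=' :: v) (p ++ ['=']) = true ↔ k = p := by
  rw [PySem.Chars.startswith_iff]
  constructor
  · rintro ⟨t, ht⟩
    have h : p ++ '=' :: t = k ++ '=' :: v := by simpa using ht
    exact (pv_eqsplit p k t v hp hk h).symm
  · rintro rfl
    exact ⟨v, by simp⟩

-- decomposition of a part at its first '='
lemma pv_find_split (part : List Char) (h : PySem.Chars.find part ['='] ≠ -1) :
    ∃ k v, part = k ++ '=' :: v ∧ '=' ∉ k ∧
      PySem.Chars.slice part none (some (PySem.Chars.find part ['='])) = k ∧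
      PySem.Chars.slice part (some (PySem.Chars.find part ['='] + 1)) none = v := by
  have hge : 0 ≤ PySem.Chars.find part ['='] := by
    have := PySem.Chars.neg_one_le_find part ['=']
    omega
  obtain ⟨hpre, hmin⟩ := PySem.Chars.find_spec hge
  set i := PySem.Chars.find part ['='] with hi
  set n := i.toNat with hn
  obtain ⟨t, ht⟩ := hpre
  have hdropn : part.drop n = '=' :: t := by simpa using ht.symm
  have hnlt : n < part.length := by
    by_contra hc
    have : part.drop n = [] := List.drop_eq_nil_of_le (by omega)
    simp [this] at hdropn
  refine ⟨part.take n, t, ?_, ?_, ?_, ?_⟩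
  · conv_lhs => rw [← List.take_append_drop n part]
    rw [hdropn]
  · intro hmem
    obtain ⟨j, hj, hje⟩ := List.getElem_of_mem hmem
    have hjn : j < n := by
      have := hj
      simp [List.length_take] at this
      omega
    have hjl : j < part.length := by omega
    have hpj : part[j] = '=' := by
      rw [← hje]; simp [List.getElem_take]
    have hdj : List.drop j part = '=' :: List.drop (j + 1) part := by
      rw [List.drop_eq_getElem_cons hjl, hpj]
    exact hmin j hjn ⟨part.drop (j + 1), by simp [hdj]⟩
  · rw [PySem.Chars.slice_eq_listSlice, PySem.List.slice_to part hge]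
  · rw [PySem.Chars.slice_eq_listSlice, PySem.List.slice_from part (by omega)]
    have h1 : (i + 1).toNat = n + 1 := by omega
    rw [h1]
    have h2 : part.drop (n + 1) = (part.drop n).drop 1 := by
      rw [List.drop_drop]
    rw [h2, hdropn]
    rfl

-- no '=' in the three keys (used to fire pv_startswith_iff)
lemma pv_not_mem_for : '=' ∉ (['f','o','r'] : List Char) := by decide
lemma pv_not_mem_host : '=' ∉ (['h','o','s','t'] : List Char) := by decide
lemma pv_not_mem_proto : '=' ∉ (['p','r','o','t','o'] : List Char) := by decide

-- one loop step preserves the correspondence between A's triple and B's dict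
lemma pv_step (st : Option String × Option String × Option String)
    (d : PySem.Dict (List Char) String) (part : List Char)
    (h1 : st.1 = d.get? ['f','o','r'])
    (h2 : st.2.1 = d.get? ['h','o','s','t'])
    (h3 : st.2.2 = d.get? ['p','r','o','t','o']) :
    (pvStepA st part).1 = (pvStepB d part).get? ['f','o','r'] ∧
    (pvStepA st part).2.1 = (pvStepB d part).get? ['h','o','s','t'] ∧
    (pvStepA st part).2.2 = (pvStepB d part).get? ['p','r','o','t','o'] := by
  by_cases hfind : PySem.Chars.find part ['='] = -1
  · -- no '=' in the part: both sides skip it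
    have hnotin : ¬ (['='] : List Char) <:+: part := (PySem.Chars.find_eq_neg_one_iff _ _).mp hfind
    have hns : ∀ p : List Char, '=' ∈ p → PySem.Chars.startswith part p = false := by
      intro p hp
      rw [Bool.eq_false_iff]
      intro hsw
      have hpre : p <+: part := (PySem.Chars.startswith_iff _ _).mp hsw
      have hmem : ('=' : Char) ∈ part := hpre.subset hp
      obtain ⟨s, t, hst⟩ := List.append_of_mem hmem
      exact hnotin ⟨s, t, by simp [hst]⟩
    have hA : pvStepA st part = st := by
      simp [pvStepA, hns ['f','o','r','='] (by decide), hns ['h','o','s','t','='] (by decide),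
        hns ['p','r','o','t','o','='] (by decide)]
    have hB : pvStepB d part = d := by
      simp [pvStepB, hfind]
    rw [hA, hB]
    exact ⟨h1, h2, h3⟩
  · obtain ⟨k, v, hpart, hk, hsk, hsv⟩ := pv_find_split part hfind
    have hB : pvStepB d part = d.insert k (String.ofList (PySem.Chars.strip v)) := by
      simp only [pvStepB, ne_eq, hfind, not_false_eq_true, if_true]
      rw [hsk, hsv]
    have hFor : PySem.Chars.startswith part ['f','o','r','='] = true ↔ k = ['f','o','r'] := by
      rw [hpart]; exact pv_startswith_iff k v ['f','o','r'] hk pv_not_mem_for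
    have hHost : PySem.Chars.startswith part ['h','o','s','t','='] = true ↔ k = ['h','o','s','t'] := by
      rw [hpart]; exact pv_startswith_iff k v ['h','o','s','t'] hk pv_not_mem_host
    have hProto : PySem.Chars.startswith part ['p','r','o','t','o','='] = true ↔ k = ['p','r','o','t','o'] := by
      rw [hpart]; exact pv_startswith_iff k v ['p','r','o','t','o'] hk pv_not_mem_proto
    by_cases hkf : k = ['f','o','r']
    · have hv : PySem.List.slice part (some 4) none = v := by
        rw [PySem.List.slice_from part (by omega), hpart, hkf]
        rfl
      have hA : pvStepA st part =
          (some (String.ofList (PySem.Chars.strip v)), st.2.1, st.2.2) := by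
        simp [pvStepA, hFor.mpr hkf, hv]
      rw [hA, hB, hkf]
      refine ⟨?_, ?_, ?_⟩
      · simp [PySem.Dict.get?_insert_self]
      · rw [PySem.Dict.get?_insert_of_ne _ _ (by decide)]; exact h2
      · rw [PySem.Dict.get?_insert_of_ne _ _ (by decide)]; exact h3
    · have bf : PySem.Chars.startswith part ['f','o','r','='] = false := by
        rw [Bool.eq_false_iff]; exact fun hc => hkf (hFor.mp hc)
      by_cases hkh : k = ['h','o','s','t']
      · have hv : PySem.List.slice part (some 5) none = v := by
          rw [PySem.List.slice_from part (by omega), hpart, hkh]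
          rfl
        have hA : pvStepA st part =
            (st.1, some (String.ofList (PySem.Chars.strip v)), st.2.2) := by
          simp [pvStepA, bf, hHost.mpr hkh, hv]
        rw [hA, hB, hkh]
        refine ⟨?_, ?_, ?_⟩
        · rw [PySem.Dict.get?_insert_of_ne _ _ (by decide)]; exact h1
        · simp [PySem.Dict.get?_insert_self]
        · rw [PySem.Dict.get?_insert_of_ne _ _ (by decide)]; exact h3
      · have bh : PySem.Chars.startswith part ['h','o','s','t','='] = false := by
          rw [Bool.eq_false_iff]; exact fun hc => hkh (hHost.mp hc)
        by_cases hkp : k = ['p','r','o','t','o']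
        · have hv : PySem.List.slice part (some 6) none = v := by
            rw [PySem.List.slice_from part (by omega), hpart, hkp]
            rfl
          have hA : pvStepA st part =
              (st.1, st.2.1, some (String.ofList (PySem.Chars.strip v))) := by
            simp [pvStepA, bf, bh, hProto.mpr hkp, hv]
          rw [hA, hB, hkp]
          refine ⟨?_, ?_, ?_⟩
          · rw [PySem.Dict.get?_insert_of_ne _ _ (by decide)]; exact h1
          · rw [PySem.Dict.get?_insert_of_ne _ _ (by decide)]; exact h2
          · simp [PySem.Dict.get?_insert_self]
        · have bp : PySem.Chars.startswith part ['p','r','o','t','o','='] = false := by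
            rw [Bool.eq_false_iff]; exact fun hc => hkp (hProto.mp hc)
          have hA : pvStepA st part = st := by
            simp [pvStepA, bf, bh, bp]
          rw [hA, hB]
          refine ⟨?_, ?_, ?_⟩
          · rw [PySem.Dict.get?_insert_of_ne _ _ (Ne.symm hkf)]; exact h1
          · rw [PySem.Dict.get?_insert_of_ne _ _ (Ne.symm hkh)]; exact h2
          · rw [PySem.Dict.get?_insert_of_ne _ _ (Ne.symm hkp)]; exact h3

-- the loop invariant, over any list of parts
lemma pv_fold (parts : List (List Char)) : ∀ (st : Option String × Option String × Option String)
    (d : PySem.Dict (List Char) String),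
    st.1 = d.get? ['f','o','r'] → st.2.1 = d.get? ['h','o','s','t'] → st.2.2 = d.get? ['p','r','o','t','o'] →
    parts.foldl pvStepA st =
      ((parts.foldl pvStepB d).get? ['f','o','r'],
       (parts.foldl pvStepB d).get? ['h','o','s','t'],
       (parts.foldl pvStepB d).get? ['p','r','o','t','o']) := by
  induction parts with
  | nil =>
    intro st d h1 h2 h3
    simp only [List.foldl_nil]
    exact Prod.ext h1 (Prod.ext h2 h3)
  | cons part rest ih =>
    intro st d h1 h2 h3
    obtain ⟨g1, g2, g3⟩ := pv_step st d part h1 h2 h3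
    simpa using ih (pvStepA st part) (pvStepB d part) g1 g2 g3

-- ===== VERDICT (by name: the statement is the Claim_ definition above) =====
theorem parse_forwarded_py_spec : Claim_equal_parse_forwarded_py := by
  intro value _
  unfold Spec_parse_forwarded_py parse_forwarded_py parse_forwarded_py_alt
  exact pv_fold (PySem.Chars.splitOn value.toList [';']) (none, none, none) PySem.Dict.empty
    (by simp) (by simp) (by simp)
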